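-- pv_equiv track=rewrite | github.com/sctigercat1/ClemBot | scripts/normalize_gdr_new/normalize_gdr.py | combine_remnant_names
-- ===== SOURCE A (Python) =====
-- def combine_remnant_names(read, year):
--     final_rows = []
--
--     if year > 2019:
--         name_row = 16
--     else:
--         name_row = 12
--
--     current_remnant_name = ""
--     for row in read:
--         if row[0] == "" and row[name_row] != "":
--             current_remnant_name += " " + row[name_row]
--         elif row[0] != "":
--             if current_remnant_name != "":
--                 if final_rows[-1][name_row][-1] == "-":
--                     current_remnant_name = current_remnant_name[1:]
--                 final_rows[-1][name_row] += current_remnant_name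
--                 current_remnant_name = ""
--
--             final_rows.append(row)
--     else:
--         # End
--         if current_remnant_name != "":
--             if final_rows[-1][name_row][-1] == "-":
--                 current_remnant_name = current_remnant_name[1:]
--             final_rows[-1][name_row] += current_remnant_name
--             current_remnant_name = ""
--
--     return final_rows
-- ===== SOURCE B (Python) =====
-- def combine_remnant_names(read, year):
--     # Two staged passes: group rows into (header, fragments), then join each
--     # group's fragments once. Mutates the header rows in place, like the original.
--     name_row = 16 if year > 2019 else 12
--
--     groups = []
--     for row in read:
--         if row[0] != "":
--             groups.append((row, []))
--         elif row[name_row] != "" and groups: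
--             groups[-1][1].append(row[name_row])
--
--     result = []
--     for header, frags in groups:
--         if frags:
--             name = header[name_row]
--             joined = " ".join(frags)
--             header[name_row] = name + joined if name.endswith("-") else name + " " + joined
--         result.append(header)
--     return result
-- ===== Notes on version B (the rewrite author's own statement) =====
-- stated objective: alternative
-- what changed: Replaces A's single pass that accumulates a remnant string and patches the previous output row at three flush sites with two staged passes: first group rows into (header, fragment-list) pairs, then join each group's fragments once with ' '.join and write the merged name; Pre_ excludes exactly the inputs where A raises IndexError (an empty row, a continuation row shorter than the name column, or a fragment whose nearest preceding header is missing, too short, or has an empty name).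
import Mathlib
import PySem

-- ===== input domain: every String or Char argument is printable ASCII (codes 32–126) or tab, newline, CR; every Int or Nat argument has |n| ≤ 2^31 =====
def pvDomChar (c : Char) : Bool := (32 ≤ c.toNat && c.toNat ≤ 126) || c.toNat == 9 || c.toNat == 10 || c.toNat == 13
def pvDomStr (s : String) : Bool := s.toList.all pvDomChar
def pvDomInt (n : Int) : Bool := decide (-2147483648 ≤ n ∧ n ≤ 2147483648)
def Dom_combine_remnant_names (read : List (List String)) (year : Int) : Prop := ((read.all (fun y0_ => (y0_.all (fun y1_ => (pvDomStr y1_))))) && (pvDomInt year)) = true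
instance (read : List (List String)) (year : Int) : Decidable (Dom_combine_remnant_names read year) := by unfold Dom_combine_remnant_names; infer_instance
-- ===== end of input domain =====

-- B restructures A into two staged passes (group, then join); equivalence is about the
-- RETURN value (both Pythons mutate the header rows of `read` in place in the same way).
def nameRow (year : Int) : Nat := if year > 2019 then 16 else 12

-- ===== PORT A =====
-- the flush Python performs both at a header row and after the loop
def pyFlushA (nr : Nat) (finals : List (List String)) (cur : String) : List (List String) :=
  if cur ≠ "" then
    match finals.getLast? with
    | none => finals  -- Python raises IndexError here (final_rows[-1]); excluded by Pre_
    | some last =>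
      finals.dropLast ++ [PySem.List.pySetD last (nr : Int)
        (PySem.List.pyGetD last (nr : Int) "" ++
          (if PySem.Str.pyGet? (PySem.List.pyGetD last (nr : Int) "") (-1) = some '-'
           then PySem.Str.slice cur (some 1) none else cur))]
  else finals

def pyStepA (nr : Nat) (st : List (List String) × String) (row : List String) : List (List String) × String :=
  if PySem.List.pyGetD row 0 "" = "" ∧ PySem.List.pyGetD row (nr : Int) "" ≠ "" then
    (st.1, st.2 ++ " " ++ PySem.List.pyGetD row (nr : Int) "")
  else if PySem.List.pyGetD row 0 "" ≠ "" then
    (pyFlushA nr st.1 st.2 ++ [row], "")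
  else
    st

def combine_remnant_names (read : List (List String)) (year : Int) : List (List String) :=
  let st := read.foldl (pyStepA (nameRow year)) ([], "")
  pyFlushA (nameRow year) st.1 st.2

-- ===== PORT B =====
-- pass 1: group rows into (header, fragment-list) pairs
def bGroupStep (nr : Nat) (gs : List (List String × List String)) (row : List String) : List (List String × List String) :=
  if PySem.List.pyGetD row 0 "" ≠ "" then
    gs ++ [(row, [])]
  else if PySem.List.pyGetD row (nr : Int) "" ≠ "" ∧ gs ≠ [] then
    match gs.getLast? with
    | none => gs
    | some g => gs.dropLast ++ [(g.1, g.2 ++ [PySem.List.pyGetD row (nr : Int) ""])]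
  else gs

-- pass 2: join each group's fragments once into its header row
def bEmit (nr : Nat) (g : List String × List String) : List String :=
  if g.2.isEmpty then g.1
  else if PySem.Str.endswith (PySem.List.pyGetD g.1 (nr : Int) "") "-" then
    PySem.List.pySetD g.1 (nr : Int) (PySem.List.pyGetD g.1 (nr : Int) "" ++ PySem.Str.join " " g.2)
  else
    PySem.List.pySetD g.1 (nr : Int) (PySem.List.pyGetD g.1 (nr : Int) "" ++ " " ++ PySem.Str.join " " g.2)

def combine_remnant_names_alt (read : List (List String)) (year : Int) : List (List String) :=
  (read.foldl (bGroupStep (nameRow year)) []).map (bEmit (nameRow year))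

-- ===== PRECONDITION & SPEC =====
-- Pre_ is exactly the set of inputs on which Python A returns normally: every row is
-- nonempty, every row whose first cell is empty is long enough to read the name column,
-- and every fragment row has a nearest preceding header that is long enough and has a
-- nonempty name cell (otherwise A raises IndexError).
def Pre_combine_remnant_names (read : List (List String)) (year : Int) : Prop :=
  (∀ r ∈ read, r ≠ [] ∧ (r.headI = "" → nameRow year < r.length)) ∧
  (∀ i : Fin read.length, read[i].headI = "" → read[i].getD (nameRow year) "" ≠ "" →
    ∃ j : Fin read.length, j < i ∧ read[j].headI ≠ "" ∧
      (∀ k : Fin read.length, j < k → k < i → read[k].headI = "") ∧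
      nameRow year < read[j].length ∧ read[j].getD (nameRow year) "" ≠ "")
instance (read : List (List String)) (year : Int) : Decidable (Pre_combine_remnant_names read year) := by unfold Pre_combine_remnant_names; infer_instance

def pvWitness_combine_remnant_names : List (List String) × Int :=
  ([["Alice", "", "", "", "", "", "", "", "", "", "", "", "Rem-"],
    ["", "", "", "", "", "", "", "", "", "", "", "", "nant"]], 2019)

def Spec_combine_remnant_names (read : List (List String)) (year : Int) (out : List (List String)) : Prop := out = combine_remnant_names_alt read year
instance (read : List (List String)) (year : Int) (out : List (List String)) : Decidable (Spec_combine_remnant_names read year out) := by unfold Spec_combine_remnant_names; infer_instance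

-- ===== CLAIM (what is proved, stated in full; the proofs are below) =====
def Claim_equal_combine_remnant_names : Prop := ∀ (read : List (List String)) (year : Int), Dom_combine_remnant_names read year → Pre_combine_remnant_names read year → Spec_combine_remnant_names read year (combine_remnant_names read year)

-- ===== LEMMAS AND PROOFS =====
-- A's accumulated remnant string for a list of fragments
def tailStr (fs : List String) : String :=
  String.ofList ((fs.map (fun f => ' ' :: f.toList)).flatten)

-- invariant tying A's loop state to B's group list
def InvAB (nr : Nat) (st : List (List String) × String) (gs : List (List String × List String)) : Prop :=
  (gs = [] ∧ st.1 = []) ∨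
  (∃ g₀ h fs, gs = g₀ ++ [(h, fs)] ∧ st.1 = g₀.map (bEmit nr) ++ [h] ∧ st.2 = tailStr fs)

theorem tailStr_snoc (fs : List String) (f : String) :
    tailStr (fs ++ [f]) = tailStr fs ++ " " ++ f := by
  apply String.toList_inj.mp
  simp [tailStr]

theorem tailStr_ne_empty (f : String) (fs : List String) : tailStr (f :: fs) ≠ "" := by
  intro h
  have := congrArg String.toList h
  simp [tailStr] at this

theorem getLast?_eq_some_iff_suffix (l : List Char) (c : Char) :
    l.getLast? = some c ↔ [c] <:+ l := by
  rw [List.getLast?_eq_some_iff]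
  constructor
  · rintro ⟨t, rfl⟩; exact ⟨t, rfl⟩
  · rintro ⟨t, rfl⟩; exact ⟨t, rfl⟩

theorem flat_tail (f : String) (fs : List String) :
    ((f :: fs).map (fun g => ' ' :: g.toList)).flatten
      = ' ' :: PySem.Chars.join [' '] ((f :: fs).map String.toList) := by
  induction fs generalizing f with
  | nil => simp [PySem.Chars.join_singleton]
  | cons b bs ih =>
    have h2 := ih b
    simp only [List.map_cons, List.flatten_cons] at h2 ⊢
    rw [PySem.Chars.join_cons_cons, h2]
    simp

theorem join_toList (fs : List String) :
    (PySem.Str.join " " fs).toList = PySem.Chars.join [' '] (fs.map String.toList) := by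
  simp [pysem]

theorem setD_eq_emit (nr : Nat) (hd : List String) (f : String) (fs' : List String) (cur : String)
    (hdash : (PySem.Str.pyGet? (PySem.List.pyGetD hd (nr : Int) "") (-1) = some '-')
        ↔ (PySem.Str.endswith (PySem.List.pyGetD hd (nr : Int) "") "-" = true))
    (hcur : cur.toList = ' ' :: (PySem.Str.join " " (f :: fs')).toList) :
    PySem.List.pySetD hd (nr : Int)
      (PySem.List.pyGetD hd (nr : Int) "" ++
        (if PySem.Str.pyGet? (PySem.List.pyGetD hd (nr : Int) "") (-1) = some '-'
         then PySem.Str.slice cur (some 1) none else cur))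
      = bEmit nr (hd, f :: fs') := by
  have h1 : (PySem.Str.slice cur (some 1) none).toList = cur.toList.tail := by
    simp [pysem, PySem.List.slice_from_one]
  by_cases hdc : PySem.Str.endswith (PySem.List.pyGetD hd (nr : Int) "") "-" = true
  · have harg : PySem.List.pyGetD hd (nr : Int) "" ++ PySem.Str.slice cur (some 1) none
        = PySem.List.pyGetD hd (nr : Int) "" ++ PySem.Str.join " " (f :: fs') := by
      apply String.toList_inj.mp
      simp only [String.toList_append, h1, hcur, List.tail_cons]
    rw [if_pos (hdash.mpr hdc), harg]
    simp only [bEmit, List.isEmpty_cons, Bool.false_eq_true, if_false, if_pos hdc]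
  · have harg : PySem.List.pyGetD hd (nr : Int) "" ++ cur
        = PySem.List.pyGetD hd (nr : Int) "" ++ " " ++ PySem.Str.join " " (f :: fs') := by
      apply String.toList_inj.mp
      have hsp : (" " : String).toList = [' '] := by decide
      simp only [String.toList_append, hcur, hsp, List.append_assoc, List.singleton_append]
    rw [if_neg (fun hh => hdc (hdash.mp hh)), harg]
    simp only [bEmit, List.isEmpty_cons, Bool.false_eq_true, if_false, if_neg hdc]

theorem flush_eq (nr : Nat) (st : List (List String) × String) (gs : List (List String × List String))
    (h : InvAB nr st gs) : pyFlushA nr st.1 st.2 = gs.map (bEmit nr) := by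
  rcases h with ⟨hgs, hfin⟩ | ⟨g₀, hd, fs, hgs, hfin, hcur⟩
  · subst hgs; rw [hfin]
    unfold pyFlushA
    split <;> simp
  · subst hgs
    cases fs with
    | nil =>
      have hcur' : st.2 = "" := by
        rw [hcur]; rfl
      rw [hfin, hcur']
      unfold pyFlushA
      rw [if_neg (by simp)]
      simp [bEmit]
    | cons f fs' =>
      have hne : st.2 ≠ "" := by rw [hcur]; exact tailStr_ne_empty f fs'
      have hdash : (PySem.Str.pyGet? (PySem.List.pyGetD hd (nr : Int) "") (-1) = some '-')
          ↔ (PySem.Str.endswith (PySem.List.pyGetD hd (nr : Int) "") "-" = true) := by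
        simp only [PySem.Str.pyGet?_eq, PySem.Chars.pyGet?_eq_listPyGet?,
          PySem.List.pyGet?_neg_one, PySem.Str.endswith_eq]
        rw [getLast?_eq_some_iff_suffix, PySem.Chars.endswith_iff]
        simp
      have hcurlist : st.2.toList = ' ' :: (PySem.Str.join " " (f :: fs')).toList := by
        rw [hcur, join_toList]
        simp only [tailStr, String.toList_ofList]
        exact flat_tail f fs'
      unfold pyFlushA
      rw [if_pos hne, hfin]
      simp only [List.getLast?_concat, List.dropLast_concat, List.map_append,
        List.map_cons, List.map_nil]
      rw [setD_eq_emit nr hd f fs' st.2 hdash hcurlist]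

theorem step_inv (nr : Nat) (st : List (List String) × String) (gs : List (List String × List String))
    (row : List String) (h : InvAB nr st gs) :
    InvAB nr (pyStepA nr st row) (bGroupStep nr gs row) := by
  by_cases h0 : PySem.List.pyGetD row 0 "" = ""
  · by_cases hn : PySem.List.pyGetD row (nr : Int) "" = ""
    · -- skipped row: both sides unchanged
      have hA : pyStepA nr st row = st := by
        unfold pyStepA
        rw [if_neg (by tauto), if_neg (by tauto)]
      have hB : bGroupStep nr gs row = gs := by
        unfold bGroupStep
        rw [if_neg (by tauto), if_neg (by tauto)]
      rw [hA, hB]; exact h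
    · -- fragment row
      have hA : pyStepA nr st row = (st.1, st.2 ++ " " ++ PySem.List.pyGetD row (nr : Int) "") := by
        unfold pyStepA; rw [if_pos ⟨h0, hn⟩]
      rcases h with ⟨hgs, hfin⟩ | ⟨g₀, hd, fs, hgs, hfin, hcur⟩
      · -- no group yet: B skips the fragment, A only changes st.2
        have hB : bGroupStep nr gs row = gs := by
          unfold bGroupStep
          rw [if_neg (by tauto), if_neg (by rintro ⟨-, h2⟩; exact h2 hgs)]
        rw [hA, hB]
        exact Or.inl ⟨hgs, hfin⟩
      · have hgsne : gs ≠ [] := by simp [hgs]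
        have hB : bGroupStep nr gs row = g₀ ++ [(hd, fs ++ [PySem.List.pyGetD row (nr : Int) ""])] := by
          unfold bGroupStep
          rw [if_neg (by tauto), if_pos ⟨hn, hgsne⟩, hgs, List.getLast?_concat]
          simp
        rw [hA, hB]
        refine Or.inr ⟨g₀, hd, fs ++ [PySem.List.pyGetD row (nr : Int) ""], rfl, hfin, ?_⟩
        rw [tailStr_snoc, ← hcur]
  · -- header row
    have hA : pyStepA nr st row = (pyFlushA nr st.1 st.2 ++ [row], "") := by
      unfold pyStepA
      rw [if_neg (by tauto), if_pos h0]
    have hB : bGroupStep nr gs row = gs ++ [(row, [])] := by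
      unfold bGroupStep; rw [if_pos h0]
    rw [hA, hB]
    refine Or.inr ⟨gs, row, [], rfl, ?_, rfl⟩
    simp [flush_eq nr st gs h]

theorem loop_inv (nr : Nat) (read : List (List String)) (st : List (List String) × String)
    (gs : List (List String × List String)) (h : InvAB nr st gs) :
    InvAB nr (read.foldl (pyStepA nr) st) (read.foldl (bGroupStep nr) gs) := by
  induction read generalizing st gs with
  | nil => exact h
  | cons r rs ih => exact ih _ _ (step_inv nr st gs r h)

-- ===== VERDICT (by name: the statement is the Claim_ definition above) =====
theorem combine_remnant_names_spec : Claim_equal_combine_remnant_names := by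
  intro read year _ _
  show combine_remnant_names read year = combine_remnant_names_alt read year
  unfold combine_remnant_names combine_remnant_names_alt
  exact flush_eq (nameRow year) _ _
    (loop_inv (nameRow year) read ([], "") [] (Or.inl ⟨rfl, rfl⟩))
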